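-- pv_equiv track=rewrite | github.com/Myselfminer/nID | nID.py | parse
-- ===== SOURCE A (Python) =====
-- class nIDError(Exception):
--     def __init__(self,value):
--         self.value=value
--     def __str__(self):
--         return repr(self.value)
--
-- def parse(nid,field):
--     try:
--         split=nid.split("@")
--         count=0
--         loop=0
--         output=""
--         for i in field:
--             count=count+1
--         for i in split:
--             if i.startswith(field):
--                 for u in i:
--                     if loop <= count:
--                         pass
--                     else:
--                         output=output+u
--                     loop=loop+1
--         return output
--     except:
--         raise nIDError("Could not Parse nid")
-- ===== SOURCE B (Python) =====
-- def parse(nid, field):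
--     s = "".join(seg for seg in nid.split("@") if seg.startswith(field))
--     return s[len(field) + 1:]
-- ===== Notes on version B (the rewrite author's own statement) =====
-- stated objective: simpler
-- what changed: Replaces A's len(field) counting loop and the global per-character counter loop over matching segments by a filter of the '@'-split, one join of the matching segments, and a single slice dropping the first len(field)+1 characters of the concatenation. (constant-factor speedup: one join/slice instead of quadratic-prone per-character string concatenation).
import Mathlib
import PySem

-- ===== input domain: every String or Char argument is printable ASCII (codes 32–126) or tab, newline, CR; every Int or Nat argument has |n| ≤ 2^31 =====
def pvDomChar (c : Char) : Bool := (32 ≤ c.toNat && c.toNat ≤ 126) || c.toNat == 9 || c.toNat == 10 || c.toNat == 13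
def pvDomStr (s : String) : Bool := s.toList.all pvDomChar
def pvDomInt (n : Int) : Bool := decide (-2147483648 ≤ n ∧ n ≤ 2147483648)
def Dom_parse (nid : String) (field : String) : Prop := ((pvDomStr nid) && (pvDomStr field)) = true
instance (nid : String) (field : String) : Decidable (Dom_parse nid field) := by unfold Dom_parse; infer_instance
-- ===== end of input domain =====

-- B replaces A's per-character counter loops by filter + join + one slice of the
-- concatenation (objective: simpler); same return value on every input.

-- ===== PORT A =====
-- A: split on "@", count = len(field) via a loop, then a global char counter `loop`
-- over all matching segments, appending chars only once `loop` exceeds `count`.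
def parse (nid : String) (field : String) : String :=
  let split := PySem.Chars.splitOn nid.toList "@".toList
  let count := field.toList.foldl (fun c _ => c + 1) (0 : Nat)
  let r := split.foldl
    (fun (st : Nat × List Char) i =>
      if PySem.Chars.startswith i field.toList then
        i.foldl (fun (st : Nat × List Char) u =>
          (st.1 + 1, if st.1 ≤ count then st.2 else st.2 ++ [u])) st
      else st)
    (0, ([] : List Char))
  String.ofList r.2

-- ===== PORT B =====
-- B: join the segments that start with `field`, then drop the first len(field)+1
-- characters of the concatenation.
def parse_alt (nid : String) (field : String) : String :=
  let s := PySem.Chars.join []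
    ((PySem.Chars.splitOn nid.toList "@".toList).filter
      (fun seg => PySem.Chars.startswith seg field.toList))
  String.ofList (PySem.Chars.slice s (some ((field.toList.length : Int) + 1)) none)

-- ===== PRECONDITION & SPEC =====
def Spec_parse (nid : String) (field : String) (out : String) : Prop := out = parse_alt nid field
instance (nid : String) (field : String) (out : String) : Decidable (Spec_parse nid field out) := by unfold Spec_parse; infer_instance

-- ===== CLAIM (what is proved, stated in full; the proofs are below) =====
def Claim_equal_parse : Prop := ∀ (nid : String) (field : String), Dom_parse nid field → Spec_parse nid field (parse nid field)

-- ===== LEMMAS AND PROOFS =====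

theorem pv_count_foldl (cs : List Char) (n : Nat) :
    cs.foldl (fun c _ => c + 1) n = n + cs.length := by
  induction cs generalizing n with
  | nil => simp
  | cons c cs ih => simp [List.foldl, ih]; omega

theorem pv_join_empty (xs : List (List Char)) :
    PySem.Chars.join [] xs = xs.flatten := by
  induction xs with
  | nil => rfl
  | cons x xs ih =>
    cases xs with
    | nil => simp [PySem.Chars.join, List.intercalate]
    | cons y ys =>
      simp only [PySem.Chars.join, List.intercalate] at ih ⊢
      simp only [List.intersperse, List.flatten_cons, ih]
      simp

theorem pv_inner (count : Nat) (cs : List Char) (n : Nat) (out : List Char) :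
    cs.foldl (fun (st : Nat × List Char) u =>
        (st.1 + 1, if st.1 ≤ count then st.2 else st.2 ++ [u])) (n, out)
    = (n + cs.length, out ++ cs.drop (count + 1 - n)) := by
  induction cs generalizing n out with
  | nil => simp
  | cons c cs ih =>
    simp only [List.foldl]
    rw [ih]
    by_cases h : n ≤ count
    · have h1 : count + 1 - n = (count + 1 - (n + 1)) + 1 := by omega
      simp [h, h1, List.drop_succ_cons]
      omega
    · have h1 : count + 1 - n = 0 := by omega
      have h2 : count + 1 - (n + 1) = 0 := by omega
      simp [h, h1, h2]
      omega

theorem pv_outer (count : Nat) (f : List Char) (segs : List (List Char)) (n : Nat) (out : List Char) :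
    segs.foldl
      (fun (st : Nat × List Char) i =>
        if PySem.Chars.startswith i f then
          i.foldl (fun (st : Nat × List Char) u =>
            (st.1 + 1, if st.1 ≤ count then st.2 else st.2 ++ [u])) st
        else st)
      (n, out)
    = (n + ((segs.filter (fun seg => PySem.Chars.startswith seg f)).flatten).length,
       out ++ ((segs.filter (fun seg => PySem.Chars.startswith seg f)).flatten).drop (count + 1 - n)) := by
  induction segs generalizing n out with
  | nil => simp
  | cons s segs ih =>
    simp only [List.foldl, List.filter]
    by_cases h : PySem.Chars.startswith s f
    · rw [h]
      simp only [if_true, pv_inner, ih, List.flatten_cons, Prod.mk.injEq]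
      rw [List.drop_append, ← List.append_assoc]
      refine ⟨by simp; omega, ?_⟩
      congr 2
      omega
    · simp only [h]
      rw [if_neg (by simp), ih]

theorem parse_spec_aux (nid field : String) : parse nid field = parse_alt nid field := by
  unfold parse parse_alt
  simp only [pv_count_foldl, Nat.zero_add, pv_outer, PySem.Chars.slice_eq_listSlice]
  rw [pv_join_empty,
      PySem.List.slice_from _ (by positivity : (0:Int) ≤ (field.toList.length : Int) + 1)]
  congr 1

-- ===== VERDICT (by name: the statement is the Claim_ definition above) =====
theorem parse_spec : Claim_equal_parse := by
  intro nid field _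
  exact parse_spec_aux nid field
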